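-- pv_equiv track=rewrite | github.com/subakarank/leetcode | two_string_array.py | two_string_array
-- ===== SOURCE A (Python) =====
-- def two_string_array(word1: list[str], word2: list[str]):
--     word1_string = ''
--     word2_string = ''
--     for word in word1:
--         word1_string += word
--
--     for word in word2:
--         word2_string += word
--
--     return word1_string == word2_string
-- ===== SOURCE B (Python) =====
-- from itertools import chain, zip_longest
--
-- def two_string_array(word1: list[str], word2: list[str]):
--     s1 = chain.from_iterable(word1)
--     s2 = chain.from_iterable(word2)
--     return all(a == b for a, b in zip_longest(s1, s2, fillvalue=None))
-- ===== Notes on version B (the rewrite author's own statement) =====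
-- stated objective: faster
-- what changed: B never builds the concatenated strings: it streams characters from both lists with chain.from_iterable and compares them in lockstep via zip_longest, short-circuiting on the first mismatch.
import Mathlib
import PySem

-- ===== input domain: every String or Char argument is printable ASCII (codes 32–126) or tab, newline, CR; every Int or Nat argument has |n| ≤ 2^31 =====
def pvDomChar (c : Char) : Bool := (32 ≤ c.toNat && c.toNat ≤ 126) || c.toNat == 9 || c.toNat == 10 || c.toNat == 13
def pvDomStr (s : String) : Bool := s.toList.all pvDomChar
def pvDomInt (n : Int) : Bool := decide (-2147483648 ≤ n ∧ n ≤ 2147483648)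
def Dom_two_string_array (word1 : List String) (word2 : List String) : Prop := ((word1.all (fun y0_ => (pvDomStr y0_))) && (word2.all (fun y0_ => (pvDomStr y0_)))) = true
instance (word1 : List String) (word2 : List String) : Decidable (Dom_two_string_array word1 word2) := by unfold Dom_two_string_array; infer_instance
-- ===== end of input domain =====

-- B streams characters from both lists and compares them in lockstep instead of building the two concatenated strings (idiomatic; same value everywhere).

-- ===== PORT A =====
-- strings are handled on the List Char side (Lean's String.append is kernel-opaque);
-- each '+= word' appends the word's characters to the accumulator, exactly as A grows its string.
def two_string_array (word1 : List String) (word2 : List String) : Bool :=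
  let word1_string := word1.foldl (fun acc w => acc ++ w.toList) ([] : List Char)
  let word2_string := word2.foldl (fun acc w => acc ++ w.toList) ([] : List Char)
  word1_string == word2_string

-- ===== PORT B =====
-- zip_longest(s1, s2, fillvalue=None) + all(a == b …): a char paired with the None fill is never
-- equal, so the lockstep comparison returns false on length mismatch, true only at ([], []).
def pvLockstep : List Char → List Char → Bool
  | [], [] => true
  | [], _ :: _ => false
  | _ :: _, [] => false
  | a :: xs, b :: ys => a == b && pvLockstep xs ys

def two_string_array_alt (word1 : List String) (word2 : List String) : Bool :=
  pvLockstep (word1.flatMap String.toList) (word2.flatMap String.toList)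

-- ===== PRECONDITION & SPEC =====
def Spec_two_string_array (word1 : List String) (word2 : List String) (out : Bool) : Prop := out = two_string_array_alt word1 word2
instance (word1 : List String) (word2 : List String) (out : Bool) : Decidable (Spec_two_string_array word1 word2 out) := by unfold Spec_two_string_array; infer_instance

-- ===== CLAIM (what is proved, stated in full; the proofs are below) =====
def Claim_equal_two_string_array : Prop := ∀ (word1 : List String) (word2 : List String), Dom_two_string_array word1 word2 → Spec_two_string_array word1 word2 (two_string_array word1 word2)

-- ===== LEMMAS AND PROOFS =====
theorem pvFoldl_append_eq_flatMap (ws : List String) (acc : List Char) :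
    ws.foldl (fun acc w => acc ++ w.toList) acc = acc ++ ws.flatMap String.toList := by
  induction ws generalizing acc with
  | nil => simp
  | cons w ws ih => simp [List.foldl_cons, ih]

theorem pvLockstep_eq_beq (xs ys : List Char) : pvLockstep xs ys = (xs == ys) := by
  induction xs generalizing ys with
  | nil => cases ys <;> simp [pvLockstep]
  | cons a xs ih =>
    cases ys with
    | nil => simp [pvLockstep]
    | cons b ys => simp [pvLockstep, ih]

-- ===== VERDICT (by name: the statement is the Claim_ definition above) =====
theorem two_string_array_spec : Claim_equal_two_string_array := by
  intro word1 word2 _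
  unfold Spec_two_string_array two_string_array two_string_array_alt
  simp [pvFoldl_append_eq_flatMap, pvLockstep_eq_beq, List.flatMap]
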